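-- pv_equiv track=rewrite | github.com/c-kick/srt-translate | scripts/validate_srt.py | fix_punctuation
-- ===== SOURCE A (Python) =====
-- PUNCTUATION_FIXES = {
--     '!': '.',  # Exclamation → period (per Dutch subtitle convention)
--     ';': '.',  # Semicolon → period
-- }
--
-- def fix_punctuation(text: str) -> tuple[str, list[str]]:
--     """Replace forbidden punctuation. Returns (fixed_text, list of fixes applied)."""
--     fixes = []
--     result = text
--     for char, replacement in PUNCTUATION_FIXES.items():
--         if char in result:
--             count = result.count(char)
--             result = result.replace(char, replacement)
--             fixes.append(f"Replaced {count} '{char}' with '{replacement}'")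
--     return result, fixes
-- ===== SOURCE B (Python) =====
-- def fix_punctuation(text: str) -> tuple[str, list[str]]:
--     """Replace forbidden punctuation in ONE fused pass over the characters,
--     counting '!' and ';' while building the output, instead of a scan+count+replace
--     per forbidden character."""
--     count_excl = 0
--     count_semi = 0
--     out = []
--     for ch in text:
--         if ch == '!':
--             count_excl += 1
--             out.append('.')
--         elif ch == ';':
--             count_semi += 1
--             out.append('.')
--         else:
--             out.append(ch)
--     fixes = []
--     if count_excl > 0:
--         fixes.append(f"Replaced {count_excl} '!' with '.'")
--     if count_semi > 0:
--         fixes.append(f"Replaced {count_semi} ';' with '.'")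
--     return ''.join(out), fixes
-- ===== Notes on version B (the rewrite author's own statement) =====
-- stated objective: alternative
-- what changed: Replaced the per-forbidden-character scan/count/replace passes with one fused pass over the characters that maintains both counts and builds the output list, emitting the fix messages from the counts afterwards.
import Mathlib
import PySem

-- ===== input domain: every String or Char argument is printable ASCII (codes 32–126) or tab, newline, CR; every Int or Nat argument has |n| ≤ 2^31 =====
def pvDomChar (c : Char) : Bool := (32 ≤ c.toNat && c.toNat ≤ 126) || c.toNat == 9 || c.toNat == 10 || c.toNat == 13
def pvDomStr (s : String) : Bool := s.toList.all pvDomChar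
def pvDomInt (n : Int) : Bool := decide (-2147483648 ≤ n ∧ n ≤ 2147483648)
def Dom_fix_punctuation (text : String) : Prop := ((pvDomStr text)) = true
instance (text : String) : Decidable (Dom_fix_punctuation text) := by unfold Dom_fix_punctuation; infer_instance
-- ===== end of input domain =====

-- B rewrites A's per-pattern scan/count/replace passes as ONE fused pass over the
-- characters that maintains both counts while building the output (alternative
-- decomposition, same result).

-- shared formatting helper = the identical f-string "Replaced {count} '{char}' with '{replacement}'"
def pvMsg (count : Nat) (ch repl : String) : String :=
  "Replaced " ++ PySem.Int.toStr (count : Int) ++ " '" ++ ch ++ "' with '" ++ repl ++ "'"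

-- ===== PORT A =====
-- PUNCTUATION_FIXES is a dict literal with distinct keys; Python iterates it in
-- insertion order, i.e. exactly the list [("!", "."), (";", ".")].
def fix_punctuation (text : String) : String × List String :=
  [("!", "."), (";", ".")].foldl
    (fun (st : String × List String) p =>
      if PySem.Str.isIn p.1 st.1 then
        (PySem.Str.replace st.1 p.1 p.2,
         st.2 ++ [pvMsg (PySem.Str.count st.1 p.1) p.1 p.2])
      else st)
    (text, [])

-- ===== PORT B =====
def fix_punctuation_alt (text : String) : String × List String :=
  let st := text.toList.foldl
    (fun (st : Nat × Nat × List Char) ch =>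
      if ch = '!' then (st.1 + 1, st.2.1, st.2.2 ++ ['.'])
      else if ch = ';' then (st.1, st.2.1 + 1, st.2.2 ++ ['.'])
      else (st.1, st.2.1, st.2.2 ++ [ch]))
    (0, 0, [])
  (String.ofList st.2.2,
   (if st.1 > 0 then [pvMsg st.1 "!" "."] else []) ++
   (if st.2.1 > 0 then [pvMsg st.2.1 ";" "."] else []))

-- ===== PRECONDITION & SPEC =====
def Spec_fix_punctuation (text : String) (out : String × List String) : Prop := out = fix_punctuation_alt text
instance (text : String) (out : String × List String) : Decidable (Spec_fix_punctuation text out) := by unfold Spec_fix_punctuation; infer_instance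

-- ===== CLAIM (what is proved, stated in full; the proofs are below) =====
def Claim_equal_fix_punctuation : Prop := ∀ (text : String), Dom_fix_punctuation text → Spec_fix_punctuation text (fix_punctuation text)

-- ===== LEMMAS AND PROOFS =====

-- B's fold, characterised
theorem altFold_eq (l : List Char) (ce cs : Nat) (out : List Char) :
    l.foldl
      (fun (st : Nat × Nat × List Char) ch =>
        if ch = '!' then (st.1 + 1, st.2.1, st.2.2 ++ ['.'])
        else if ch = ';' then (st.1, st.2.1 + 1, st.2.2 ++ ['.'])
        else (st.1, st.2.1, st.2.2 ++ [ch]))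
      (ce, cs, out)
    = (ce + l.count '!', cs + l.count ';',
       out ++ l.map (fun x => if x = '!' then '.' else if x = ';' then '.' else x)) := by
  induction l generalizing ce cs out with
  | nil => simp
  | cons h t ih =>
    by_cases h1 : h = '!'
    · simp [h1, ih]
      omega
    · by_cases h2 : h = ';'
      · simp [h2, ih]
        omega
      · simp [h1, h2, ih]

-- count of a single character = List.count
theorem countGo_single (c : Char) (l : List Char) (fuel acc : Nat) (h : l.length ≤ fuel) :
    PySem.Chars.count.go [c] fuel l acc = acc + l.count c := by
  induction l generalizing fuel acc with
  | nil => cases fuel <;> simp [PySem.Chars.count.go]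
  | cons x t ih =>
    cases fuel with
    | zero => simp at h
    | succ n =>
      simp only [List.length_cons] at h
      by_cases hx : c = x
      · subst hx
        simp only [PySem.Chars.count.go, List.isPrefixOf, List.drop_succ_cons, List.drop_zero,
          BEq.rfl, Bool.and_self, if_pos, List.length_singleton]
        rw [ih n _ (by omega), List.count_cons]
        simp
        omega
      · have hne : ¬ (x = c) := fun e => hx e.symm
        simp [PySem.Chars.count.go, List.isPrefixOf, hx, ih n _ (by omega), hne]

theorem count_single (c : Char) (s : List Char) :
    PySem.Chars.count s [c] = s.count c := by
  simpa [PySem.Chars.count] using countGo_single c s s.length 0 le_rfl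

-- replace of a single character = map
theorem replaceGo_single (c r : Char) (l : List Char) (fuel : Nat) (acc : List Char)
    (h : l.length ≤ fuel) :
    PySem.Chars.replace.go [c] [r] fuel l acc
      = acc.reverse ++ l.map (fun x => if x = c then r else x) := by
  induction l generalizing fuel acc with
  | nil => cases fuel <;> simp [PySem.Chars.replace.go]
  | cons x t ih =>
    cases fuel with
    | zero => simp at h
    | succ n =>
      simp only [List.length_cons] at h
      by_cases hx : c = x
      · subst hx
        simp only [PySem.Chars.replace.go, List.isPrefixOf, List.drop_succ_cons, List.drop_zero,
          BEq.rfl, Bool.and_self, if_pos, List.length_singleton, List.reverse_singleton]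
        rw [ih n _ (by omega)]
        simp
      · have hne : ¬ (x = c) := fun e => hx e.symm
        simp [PySem.Chars.replace.go, List.isPrefixOf, hx, ih n _ (by omega), hne]

theorem replace_single (c r : Char) (s : List Char) :
    PySem.Chars.replace s [c] [r] = s.map (fun x => if x = c then r else x) := by
  simpa [PySem.Chars.replace] using replaceGo_single c r s s.length [] le_rfl

-- membership of a single character
theorem findGo_single_eq_neg_one (c : Char) (l : List Char) (k : Nat) :
    PySem.Chars.find.go [c] l k = -1 ↔ c ∉ l := by
  induction l generalizing k with
  | nil => simp [PySem.Chars.find.go]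
  | cons x t ih =>
    by_cases hx : c = x
    · simp [PySem.Chars.find.go, List.isPrefixOf, hx]
    · have : ¬ (x = c) := fun e => hx e.symm
      simp [PySem.Chars.find.go, List.isPrefixOf, hx, ih]

theorem isIn_single (c : Char) (s : List Char) :
    PySem.Chars.isIn [c] s = true ↔ c ∈ s := by
  simp [PySem.Chars.isIn, PySem.Chars.find, findGo_single_eq_neg_one]

-- ===== VERDICT (by name: the statement is the Claim_ definition above) =====
-- pointwise facts about the two replacement maps
theorem count_semi_map (cs : List Char) :
    (cs.map (fun x => if x = '!' then '.' else x)).count ';' = cs.count ';' := by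
  induction cs with
  | nil => simp
  | cons h t ih => by_cases hh : h = '!' <;> simp [hh, List.count_cons, ih]

theorem mem_semi_map (cs : List Char) :
    (';' ∈ cs.map (fun x => if x = '!' then '.' else x)) ↔ ';' ∈ cs := by
  induction cs with
  | nil => simp
  | cons h t ih => by_cases hh : h = '!' <;> simp [hh, ih]

theorem map_comp_f (cs : List Char) :
    (cs.map (fun x => if x = '!' then '.' else x)).map (fun x => if x = ';' then '.' else x)
      = cs.map (fun x => if x = '!' then '.' else if x = ';' then '.' else x) := by
  rw [List.map_map]
  refine List.map_congr_left fun x _ => ?_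
  by_cases h1 : x = '!' <;> by_cases h2 : x = ';' <;> simp [h1, h2, Function.comp]

theorem fix_punctuation_spec : Claim_equal_fix_punctuation := by
  intro text _
  unfold Spec_fix_punctuation fix_punctuation fix_punctuation_alt
  simp only [List.foldl_cons, List.foldl_nil, altFold_eq, Nat.zero_add, List.nil_append,
    PySem.Str.isIn, PySem.Str.replace, PySem.Str.count,
    show ("!" : String).toList = ['!'] from rfl,
    show (";" : String).toList = [';'] from rfl,
    show ("." : String).toList = ['.'] from rfl]
  by_cases hE : '!' ∈ text.toList <;> by_cases hS : ';' ∈ text.toList <;>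
    simp [isIn_single, hE, hS, replace_single, count_single, String.toList_ofList,
      count_semi_map, mem_semi_map, List.count_pos_iff]
  · exact congrArg _ (by rw [← List.map_map]; exact map_comp_f _)
  · exact congrArg _ (List.map_congr_left fun x hx => by
      have hne : x ≠ ';' := fun e => hS (e ▸ hx)
      by_cases h1 : x = '!' <;> simp [h1, hne])
  · exact congrArg _ (List.map_congr_left fun x hx => by
      have hne : x ≠ '!' := fun e => hE (e ▸ hx)
      simp [hne])
  · conv_lhs => rw [← String.ofList_toList (s := text)]
    refine congrArg _ (Eq.symm ?_)
    calc List.map (fun x => if x = '!' then '.' else if x = ';' then '.' else x) text.toList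
        = List.map id text.toList := List.map_congr_left fun x hx => by
          have h1 : x ≠ '!' := fun e => hE (e ▸ hx)
          have h2 : x ≠ ';' := fun e => hS (e ▸ hx)
          simp [h1, h2]
      _ = text.toList := List.map_id _
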